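-- pv_equiv track=rewrite | github.com/SwathyAnand100/LLMExperiments | Problem 2/problem_2.py | claude_cot_pass3
-- ===== SOURCE A (Python) =====
-- def claude_cot_pass3(txt):
--     if not txt:
--         return False
--
--     i = len(txt) - 1
--
--     # Skip trailing spaces
--     while i >= 0 and txt[i].isspace():
--         i -= 1
--
--     # Edge case: string had only spaces
--     if i < 0:
--         return False
--
--     # Check if last non-space character is alphabetical
--     if not txt[i].isalpha():
--         return False
--
--     # Check if it is standalone (either start of string or preceded by space)
--     if i == 0 or txt[i-1].isspace():
--         return True
--
--     return False
-- ===== SOURCE B (Python) =====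
-- def claude_cot_pass3(txt):
--     words = txt.split()
--     if not words:
--         return False
--     last = words[-1]
--     return len(last) == 1 and last.isalpha()
-- ===== Notes on version B (the rewrite author's own statement) =====
-- stated objective: simpler
-- what changed: Replaces A's backward character scan with standalone-neighbour guards by tokenizing with split() and checking that the last word has length 1 and is alphabetic.
import Mathlib
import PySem

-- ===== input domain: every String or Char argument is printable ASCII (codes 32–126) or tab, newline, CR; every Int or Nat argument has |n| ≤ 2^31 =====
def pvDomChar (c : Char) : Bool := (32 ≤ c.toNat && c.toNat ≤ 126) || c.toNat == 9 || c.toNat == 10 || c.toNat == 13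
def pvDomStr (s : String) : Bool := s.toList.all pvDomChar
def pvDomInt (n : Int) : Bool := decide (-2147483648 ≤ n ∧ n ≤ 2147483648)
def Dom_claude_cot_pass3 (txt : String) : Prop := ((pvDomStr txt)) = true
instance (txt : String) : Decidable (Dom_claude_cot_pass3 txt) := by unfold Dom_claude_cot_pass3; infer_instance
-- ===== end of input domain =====

-- B replaces A's backward character scan (skip trailing spaces, check the char and its left
-- neighbour) by tokenizing with split() and testing the last word; objective: simpler.

-- ===== PORT A =====
-- the 'while i >= 0 and txt[i].isspace(): i -= 1' loop, as structural recursion on the index;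
-- every index read is in range along the scan, so getD is exact for Python's txt[i]
def pvSkipA (cs : List Char) : Nat → Option Nat
  | 0 => if PySem.Chars.isspace (cs.getD 0 ' ') then none else some 0
  | (i+1) => if PySem.Chars.isspace (cs.getD (i+1) ' ') then pvSkipA cs i else some (i+1)

def claude_cot_pass3 (txt : String) : Bool :=
  let cs := txt.toList
  if cs.isEmpty then false
  else
    match pvSkipA cs (cs.length - 1) with
    | none => false     -- string had only spaces
    | some i =>
      if !(PySem.Chars.isalpha (cs.getD i ' ')) then false
      else if i == 0 || PySem.Chars.isspace (cs.getD (i-1) ' ') then true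
      else false

-- ===== PORT B =====
def claude_cot_pass3_alt (txt : String) : Bool :=
  let words := PySem.Chars.split₀ txt.toList
  match words.getLast? with          -- 'if not words: return False' / 'last = words[-1]'
  | none => false
  | some last => decide (last.length = 1) && PySem.Chars.strIsalpha last

-- ===== PRECONDITION & SPEC =====
def Spec_claude_cot_pass3 (txt : String) (out : Bool) : Prop := out = claude_cot_pass3_alt txt
instance (txt : String) (out : Bool) : Decidable (Spec_claude_cot_pass3 txt out) := by unfold Spec_claude_cot_pass3; infer_instance

-- ===== CLAIM (what is proved, stated in full; the proofs are below) =====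
def Claim_equal_claude_cot_pass3 : Prop := ∀ (txt : String), Dom_claude_cot_pass3 txt → Spec_claude_cot_pass3 txt (claude_cot_pass3 txt)

-- ===== LEMMAS AND PROOFS =====

-- common characterization: the last whitespace-separated token, read off the reversed string
def pvLastTok (r : List Char) : Option (List Char) :=
  match r.dropWhile PySem.Chars.isspace with
  | [] => none
  | d => some ((d.takeWhile (fun c => !PySem.Chars.isspace c)).reverse)

-- forward recursion computing the last word with a pending (reversed) partial word
def pvLastWord : List Char → List Char → Option (List Char)
  | [], cur => if cur.isEmpty then none else some cur.reverse
  | c :: rest, cur =>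
    if PySem.Chars.isspace c then
      match pvLastWord rest [] with
      | some w => some w
      | none => if cur.isEmpty then none else some cur.reverse
    else pvLastWord rest (c :: cur)

theorem pv_go_acc (s : List Char) : ∀ cur acc,
    PySem.Chars.split₀.go s cur acc = acc.reverse ++ PySem.Chars.split₀.go s cur [] := by
  induction s with
  | nil => intro cur acc; simp [PySem.Chars.split₀.go]; split <;> simp
  | cons c rest ih =>
    intro cur acc
    simp only [PySem.Chars.split₀.go]
    split
    · split
      · exact ih [] acc
      · rw [ih [] (cur.reverse :: acc), ih [] [cur.reverse]]; simp
    · exact ih (c :: cur) acc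

theorem pv_go_last (s : List Char) : ∀ cur,
    (PySem.Chars.split₀.go s cur []).getLast? = pvLastWord s cur := by
  induction s with
  | nil =>
    intro cur; simp [PySem.Chars.split₀.go, pvLastWord]; split <;> simp
  | cons c rest ih =>
    intro cur
    simp only [PySem.Chars.split₀.go, pvLastWord]
    split
    · split
      · rw [ih []]; rcases pvLastWord rest [] with _ | w <;> rfl
      · rw [pv_go_acc]
        have hih := ih []
        rcases h : PySem.Chars.split₀.go rest [] [] with _ | ⟨w, ws⟩
        · rw [h] at hih; simp only [List.getLast?_nil] at hih; rw [← hih]; simp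
        · rw [h] at hih
          rcases h2 : (w :: ws).getLast? with _ | x
          · exact absurd (List.getLast?_eq_none_iff.1 h2) (by simp)
          · rw [h2] at hih; rw [← hih]
            simp [h2]
    · exact ih (c :: cur)

theorem pv_takeWhile_append_stop {p : Char → Bool} {c : Char} (hc : p c = false) :
    ∀ (xs ys : List Char), (xs ++ c :: ys).takeWhile p = xs.takeWhile p := by
  intro xs ys
  induction xs with
  | nil => simp [List.takeWhile, hc]
  | cons x xs ih => simp [List.takeWhile]; split <;> simp_all

theorem pv_lastWord_rev (s : List Char) : ∀ cur, cur.all (fun c => !PySem.Chars.isspace c) →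
    pvLastWord s cur = pvLastTok (s.reverse ++ cur) := by
  induction s with
  | nil =>
    intro cur hcur
    rcases cur with _ | ⟨c, cs⟩
    · simp [pvLastWord, pvLastTok]
    · simp only [List.all_cons, Bool.and_eq_true, Bool.not_eq_true'] at hcur
      have htw : List.takeWhile (fun c => !PySem.Chars.isspace c) cs = cs :=
        List.takeWhile_eq_self_iff.2 (by
          intro x hx
          simp [List.all_eq_true.1 hcur.2 x hx])
      simp [pvLastWord, pvLastTok, hcur.1, List.takeWhile, htw]
  | cons c rest ih =>
    intro cur hcur
    have hrw : (c :: rest).reverse ++ cur = rest.reverse ++ (c :: cur) := by simp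
    rw [hrw]
    by_cases hc : PySem.Chars.isspace c = true
    · rw [show pvLastWord (c :: rest) cur
          = (match pvLastWord rest [] with
             | some w => some w
             | none => if cur.isEmpty then none else some cur.reverse) by
        simp [pvLastWord, hc]]
      rw [ih [] (by simp), List.append_nil]
      rcases hd : List.dropWhile PySem.Chars.isspace rest.reverse with _ | ⟨x, xs⟩
      · -- rest.reverse is all whitespace
        have h1 : List.dropWhile PySem.Chars.isspace (rest.reverse ++ c :: cur) = cur := by
          rw [List.dropWhile_append, hd]
          simp only [List.isEmpty_nil, if_true, List.dropWhile_cons, hc]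
          rcases cur with _ | ⟨y, ys⟩
          · simp
          · simp only [List.all_cons, Bool.and_eq_true, Bool.not_eq_true'] at hcur
            simp [List.dropWhile, hcur.1]
        simp only [pvLastTok, hd, h1]
        rcases cur with _ | ⟨y, ys⟩
        · rfl
        · simp only [List.all_cons, Bool.and_eq_true, Bool.not_eq_true'] at hcur
          have htw : List.takeWhile (fun c => !PySem.Chars.isspace c) (y :: ys) = y :: ys :=
            List.takeWhile_eq_self_iff.2 (by
              intro z hz
              rcases List.mem_cons.1 hz with h | h
              · simp [h, hcur.1]
              · simp [List.all_eq_true.1 hcur.2 z h])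
          simp [htw]
      · -- a word exists in rest.reverse
        have h1 : List.dropWhile PySem.Chars.isspace (rest.reverse ++ c :: cur)
            = x :: (xs ++ c :: cur) := by
          rw [List.dropWhile_append, hd]; simp
        have h2 := pv_takeWhile_append_stop (p := fun c => !PySem.Chars.isspace c)
            (c := c) (by simp [hc]) (x :: xs) cur
        simp only [pvLastTok, hd, h1]
        rw [show x :: (xs ++ c :: cur) = (x :: xs) ++ c :: cur from rfl, h2]
    · rw [show pvLastWord (c :: rest) cur = pvLastWord rest (c :: cur) by
        simp [pvLastWord, hc]]
      exact ih (c :: cur) (by simp [hcur, hc])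

theorem pv_split_last (cs : List Char) :
    (PySem.Chars.split₀ cs).getLast? = pvLastTok cs.reverse := by
  have := pv_lastWord_rev cs [] (by simp)
  simp only [List.append_nil] at this
  rw [PySem.Chars.split₀, pv_go_last, this]

-- A-side lemmas
theorem pv_skip_le (cs : List Char) : ∀ j i, pvSkipA cs j = some i → i ≤ j := by
  intro j
  induction j with
  | zero => intro i h; simp [pvSkipA] at h; omega
  | succ k ih =>
    intro i h; simp only [pvSkipA] at h
    split at h
    · exact le_trans (ih i h) (Nat.le_succ k)
    · simp_all

theorem pv_skip_append (es : List Char) (cs : List Char) :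
    ∀ j, j < cs.length → pvSkipA (cs ++ es) j = pvSkipA cs j := by
  intro j
  induction j with
  | zero =>
    intro h
    simp only [pvSkipA]
    rw [List.getD_append cs es ' ' 0 h]
  | succ k ih =>
    intro h
    simp only [pvSkipA]
    rw [List.getD_append cs es ' ' (k+1) h]
    split
    · exact ih (Nat.lt_of_succ_lt h)
    · rfl

-- the common characterization, as a Bool
def pvR (cs : List Char) : Bool :=
  match pvLastTok cs.reverse with
  | none => false
  | some w => decide (w.length = 1) && PySem.Chars.strIsalpha w

def pvA (cs : List Char) : Bool :=
  if cs.isEmpty then false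
  else
    match pvSkipA cs (cs.length - 1) with
    | none => false
    | some i =>
      if !(PySem.Chars.isalpha (cs.getD i ' ')) then false
      else if i == 0 || PySem.Chars.isspace (cs.getD (i-1) ' ') then true
      else false

theorem pvA_eq_R (cs : List Char) : pvA cs = pvR cs := by
  induction cs using List.reverseRecOn with
  | nil => rfl
  | append_singleton ds c ih =>
    by_cases hc : PySem.Chars.isspace c = true
    · -- trailing space: both sides reduce to ds
      have hR : pvR (ds ++ [c]) = pvR ds := by
        simp only [pvR, pvLastTok]
        rw [List.reverse_append]
        simp [hc]
      rcases ds with _ | ⟨d₀, ds'⟩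
      · have h0 : pvSkipA [c] 0 = none := by
          simp only [pvSkipA]
          simp [List.getD, hc]
        simp [pvA, h0, pvR, pvLastTok, List.dropWhile, hc]
      · rw [hR, ← ih]
        have hlen : ((d₀ :: ds') ++ [c]).length - 1 = ds'.length + 1 := by simp
        have hget : ((d₀ :: ds') ++ [c]).getD (ds'.length + 1) ' ' = c := by
          rw [List.getD_append_right _ _ _ _ (by simp)]
          simp
        have hskip : pvSkipA ((d₀ :: ds') ++ [c]) (((d₀ :: ds') ++ [c]).length - 1)
            = pvSkipA (d₀ :: ds') ((d₀ :: ds').length - 1) := by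
          rw [hlen]
          show (if PySem.Chars.isspace (((d₀ :: ds') ++ [c]).getD (ds'.length+1) ' ') then
              pvSkipA ((d₀ :: ds') ++ [c]) ds'.length else some (ds'.length+1)) = _
          rw [hget, if_pos hc, pv_skip_append [c] (d₀ :: ds') ds'.length (by simp)]
          simp
        have hne : ((d₀ :: ds') ++ [c]).isEmpty = false := by simp
        have hne' : (d₀ :: ds').isEmpty = false := by simp
        simp only [pvA, hne, hne', Bool.false_eq_true, if_false, hskip]
        rcases hres : pvSkipA (d₀ :: ds') ((d₀ :: ds').length - 1) with _ | i
        · rfl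
        · have hi : i < (d₀ :: ds').length := by
            have := pv_skip_le (d₀ :: ds') _ _ hres
            simp at this ⊢; omega
          have h1 : ((d₀ :: ds') ++ [c]).getD i ' ' = (d₀ :: ds').getD i ' ' :=
            List.getD_append _ _ _ _ hi
          have h2 : ((d₀ :: ds') ++ [c]).getD (i-1) ' ' = (d₀ :: ds').getD (i-1) ' ' :=
            List.getD_append _ _ _ _ (by omega)
          simp only [List.cons_append, List.getD] at h1 h2
          simp [List.getD, h1, h2]
    · -- last char not a space: the scan stops at it immediately
      have hgetc : (ds ++ [c]).getD ds.length ' ' = c := by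
        rw [List.getD_append_right _ _ _ _ (by simp)]
        simp
      have hskip : pvSkipA (ds ++ [c]) ((ds ++ [c]).length - 1) = some ds.length := by
        have hlen : (ds ++ [c]).length - 1 = ds.length := by simp
        rw [hlen]
        cases hn : ds.length with
        | zero =>
          rw [hn] at hgetc
          simp only [pvSkipA]
          rw [hgetc]
          simp [hc]
        | succ k =>
          rw [hn] at hgetc
          simp only [pvSkipA]
          rw [hgetc]
          simp [hc]
      have hne : ((ds ++ [c]).isEmpty) = false := by simp
      simp only [pvA, hne, Bool.false_eq_true, if_false, hskip]
      rw [hgetc]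
      have hdrop : ((ds ++ [c]).reverse).dropWhile PySem.Chars.isspace = c :: ds.reverse := by
        simp [hc]
      by_cases hdsne : ds = []
      · -- single character string
        subst hdsne
        simp [pvR, pvLastTok, hc, List.takeWhile, PySem.Chars.strIsalpha]
      · have hprev : (ds ++ [c]).getD (ds.length - 1) ' ' = ds.getLast hdsne := by
          rw [List.getD_append _ _ _ _ (by
            have := List.length_pos_iff.2 hdsne; omega)]
          rw [List.getLast_eq_getElem]
          exact List.getD_eq_getElem ds ' ' _
        have hlen0 : (ds.length == 0) = false := by
          simp [List.length_eq_zero_iff, hdsne]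
        simp only [pvR, pvLastTok, hdrop, hlen0, Bool.false_or, hprev]
        have hhead : ds.reverse = ds.getLast hdsne :: ds.reverse.tail := by
          rcases hrev : ds.reverse with _ | ⟨y, ys⟩
          · exact absurd (by simpa using hrev) hdsne
          · have hy : y = ds.getLast hdsne := by
              have := List.head_reverse (l := ds)
              simp_all
            simp [hy]
        by_cases hsp : PySem.Chars.isspace (ds.getLast hdsne) = true
        · -- standalone last letter
          have htk : (c :: ds.reverse).takeWhile (fun x => !PySem.Chars.isspace x) = [c] := by
            rw [hhead]; simp [List.takeWhile, hc, hsp]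
          simp [htk, PySem.Chars.strIsalpha, hsp]
        · -- last word longer than one letter
          have htk : (c :: ds.reverse).takeWhile (fun x => !PySem.Chars.isspace x)
              = c :: ds.getLast hdsne :: (ds.reverse.tail.takeWhile (fun x => !PySem.Chars.isspace x)) := by
            rw [hhead]; simp [List.takeWhile, hc, hsp]
          simp [htk, hsp]

theorem pvB_char (cs : List Char) :
    (match (PySem.Chars.split₀ cs).getLast? with
      | none => false
      | some w => decide (w.length = 1) && PySem.Chars.strIsalpha w) = pvR cs := by
  rw [pv_split_last]; rfl

-- ===== VERDICT (by name: the statement is the Claim_ definition above) =====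
theorem claude_cot_pass3_spec : Claim_equal_claude_cot_pass3 := by
  intro txt _
  show claude_cot_pass3 txt = claude_cot_pass3_alt txt
  have hA : claude_cot_pass3 txt = pvA txt.toList := rfl
  have hB : claude_cot_pass3_alt txt
      = (match (PySem.Chars.split₀ txt.toList).getLast? with
        | none => false
        | some w => decide (w.length = 1) && PySem.Chars.strIsalpha w) := rfl
  rw [hA, hB, pvB_char, pvA_eq_R]
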